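-- pv_equiv track=rewrite | github.com/jstuker/massalia.events | crawler/scripts/generate-venue-pages.py | is_stub_page
-- ===== SOURCE A (Python) =====
-- def is_stub_page(content: str) -> bool:
--     """Check if a page is a stub (has empty description or body)."""
--     # Check for empty description
--     if 'description: ""' in content:
--         return True
--
--     # Check for empty body (only frontmatter)
--     lines = content.strip().split("\n")
--     # Find the end of frontmatter
--     in_frontmatter = False
--     body_start = 0
--     for i, line in enumerate(lines):
--         if line == "---":
--             if not in_frontmatter:
--                 in_frontmatter = True
--             else:
--                 body_start = i + 1
--                 break
--
--     # Check if there's any content after frontmatter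
--     body = "\n".join(lines[body_start:]).strip()
--     return len(body) == 0
-- ===== SOURCE B (Python) =====
-- def is_stub_page(content: str) -> bool:
--     """Check if a page is a stub (has empty description or body)."""
--     if 'description: ""' in content:
--         return True
--     # Single pass: count frontmatter markers and track blankness of the whole
--     # page and of everything after the second marker; pick at the end.
--     markers = 0
--     all_blank = True
--     tail_blank = True
--     for line in content.strip().split("\n"):
--         blank = line.strip() == ""
--         if markers >= 2:
--             tail_blank = tail_blank and blank
--         if line == "---":
--             markers += 1
--         all_blank = all_blank and blank
--     return tail_blank if markers >= 2 else all_blank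
-- ===== Notes on version B (the rewrite author's own statement) =====
-- stated objective: alternative
-- what changed: Replaces A's two-stage algorithm (break-out state machine locating the second '---' line, then slicing, joining and stripping the tail) with a single fold over the lines that maintains a marker count and two blankness flags and never builds the joined body string.
import Mathlib
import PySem

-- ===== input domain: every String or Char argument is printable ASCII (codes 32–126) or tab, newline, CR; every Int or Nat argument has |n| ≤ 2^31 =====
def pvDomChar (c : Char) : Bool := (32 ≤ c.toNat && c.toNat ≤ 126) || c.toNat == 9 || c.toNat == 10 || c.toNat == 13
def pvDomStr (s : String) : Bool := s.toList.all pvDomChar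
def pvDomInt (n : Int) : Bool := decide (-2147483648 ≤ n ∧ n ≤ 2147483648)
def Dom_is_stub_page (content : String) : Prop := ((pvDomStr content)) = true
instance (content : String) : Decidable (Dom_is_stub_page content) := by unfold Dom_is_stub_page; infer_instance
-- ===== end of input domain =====

-- B replaces A's two-stage find-second-marker-then-join-and-strip with a single pass over
-- the lines accumulating a marker count and two blankness flags (objective: alternative).

-- ===== PORT A =====
-- the break-out for-loop of A: state (i, in_frontmatter), returns body_start (0 if no break)
def pvFindBodyA : List String → Int → Bool → Int
  | [], _, _ => 0
  | l :: rest, i, inFm =>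
    if l == "---" then
      if !inFm then pvFindBodyA rest (i + 1) true
      else i + 1
    else pvFindBodyA rest (i + 1) inFm

def is_stub_page (content : String) : Bool :=
  if PySem.Str.isIn "description: \"\"" content then true
  else
    let lines := (PySem.Str.split? (PySem.Str.strip content) "\n").getD []
    let bodyStart := pvFindBodyA lines 0 false
    let body := PySem.Str.strip (PySem.Str.join "\n" (PySem.List.slice lines (some bodyStart) none))
    PySem.Str.len body == 0

-- ===== PORT B =====
-- the loop body of B: state (markers, all_blank, tail_blank)
def pvStepB (st : Int × Bool × Bool) (line : String) : Int × Bool × Bool :=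
  let blank := PySem.Str.strip line == ""
  let tailBlank := if 2 ≤ st.1 then st.2.2 && blank else st.2.2
  let markers := if line == "---" then st.1 + 1 else st.1
  (markers, st.2.1 && blank, tailBlank)

def is_stub_page_alt (content : String) : Bool :=
  if PySem.Str.isIn "description: \"\"" content then true
  else
    let lines := (PySem.Str.split? (PySem.Str.strip content) "\n").getD []
    -- for line in lines: state (markers, all_blank, tail_blank)
    let st := lines.foldl pvStepB (0, true, true)
    if 2 ≤ st.1 then st.2.2 else st.2.1

-- ===== PRECONDITION & SPEC =====
def Spec_is_stub_page (content : String) (out : Bool) : Prop := out = is_stub_page_alt content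
instance (content : String) (out : Bool) : Decidable (Spec_is_stub_page content out) := by unfold Spec_is_stub_page; infer_instance

-- ===== CLAIM (what is proved, stated in full; the proofs are below) =====
def Claim_equal_is_stub_page : Prop := ∀ (content : String), Dom_is_stub_page content → Spec_is_stub_page content (is_stub_page content)

-- ===== LEMMAS AND PROOFS =====

-- proof-side vocabulary
def pvDropToMarker : List String → Option (List String)
  | [] => none
  | l :: rest => if l == "---" then some rest else pvDropToMarker rest

def pvAllBlank (lines : List String) : Bool := lines.all (fun l => PySem.Str.strip l == "")

def pvCount (lines : List String) : Int := (lines.countP (· == "---") : Int)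

theorem pvDrop_length {lines r : List String} (h : pvDropToMarker lines = some r) :
    r.length < lines.length := by
  induction lines with
  | nil => simp [pvDropToMarker] at h
  | cons l rest ih =>
    simp only [pvDropToMarker] at h
    split_ifs at h with hm
    · cases h; simp
    · exact Nat.lt_succ_of_lt (ih h)

theorem pvDrop_drop {lines r : List String} (h : pvDropToMarker lines = some r) :
    lines.drop (lines.length - r.length) = r := by
  induction lines with
  | nil => simp [pvDropToMarker] at h
  | cons l rest ih =>
    simp only [pvDropToMarker] at h
    split_ifs at h with hm
    · cases h; simp
    · have hlt := pvDrop_length h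
      have : (l :: rest).length - r.length = (rest.length - r.length) + 1 := by
        simp only [List.length_cons]; omega
      rw [this, List.drop_succ_cons, ih h]

-- A's loop, characterised through pvDropToMarker, case by case
theorem pvFindA_none (lines : List String) (k : Int) (fm : Bool)
    (h : pvDropToMarker lines = none) : pvFindBodyA lines k fm = 0 := by
  induction lines generalizing k fm with
  | nil => rfl
  | cons l rest ih =>
    by_cases hm : (l == "---") = true
    · rw [show pvDropToMarker (l :: rest) = some rest from by simp [pvDropToMarker, hm]] at h
      exact absurd h (by simp)
    · have hm' : (l == "---") = false := by simpa using hm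
      rw [show pvDropToMarker (l :: rest) = pvDropToMarker rest from by
        simp [pvDropToMarker, hm']] at h
      have hstep : pvFindBodyA (l :: rest) k fm = pvFindBodyA rest (k + 1) fm := by
        simp [pvFindBodyA, hm']
      rw [hstep]
      exact ih (k + 1) fm h
theorem pvFindA_true_some (lines : List String) (k : Nat) {r : List String}
    (h : pvDropToMarker lines = some r) :
    pvFindBodyA lines (k : Int) true = ((k + (lines.length - r.length) : Nat) : Int) := by
  induction lines generalizing k r with
  | nil => simp [pvDropToMarker] at h
  | cons l rest ih =>
    by_cases hm : (l == "---") = true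
    · rw [show pvDropToMarker (l :: rest) = some rest from by simp [pvDropToMarker, hm]] at h
      obtain rfl : rest = r := Option.some.inj h
      have h1 : pvFindBodyA (l :: rest) (k : Int) true = (k : Int) + 1 := by
        simp [pvFindBodyA, hm]
      rw [h1]
      simp only [List.length_cons]
      norm_cast
      omega
    · have hm' : (l == "---") = false := by simpa using hm
      rw [show pvDropToMarker (l :: rest) = pvDropToMarker rest from by
        simp [pvDropToMarker, hm']] at h
      have h1 : pvFindBodyA (l :: rest) (k : Int) true = pvFindBodyA rest ((k : Int) + 1) true := by
        simp [pvFindBodyA, hm']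
      have hlt := pvDrop_length h
      rw [h1, show (k : Int) + 1 = ((k + 1 : Nat) : Int) from by push_cast; ring, ih (k + 1) h]
      simp only [List.length_cons]
      norm_cast
      omega
theorem pvFindA_false_one (lines : List String) (k : Int) {r1 : List String}
    (h : pvDropToMarker lines = some r1) (h1 : pvDropToMarker r1 = none) :
    pvFindBodyA lines k false = 0 := by
  induction lines generalizing k r1 with
  | nil => simp [pvDropToMarker] at h
  | cons l rest ih =>
    by_cases hm : (l == "---") = true
    · rw [show pvDropToMarker (l :: rest) = some rest from by simp [pvDropToMarker, hm]] at h
      obtain rfl : rest = r1 := Option.some.inj h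
      have hstep : pvFindBodyA (l :: rest) k false = pvFindBodyA rest (k + 1) true := by
        simp [pvFindBodyA, hm]
      rw [hstep]
      exact pvFindA_none rest (k + 1) true h1
    · have hm' : (l == "---") = false := by simpa using hm
      rw [show pvDropToMarker (l :: rest) = pvDropToMarker rest from by
        simp [pvDropToMarker, hm']] at h
      have hstep : pvFindBodyA (l :: rest) k false = pvFindBodyA rest (k + 1) false := by
        simp [pvFindBodyA, hm']
      rw [hstep]
      exact ih (k + 1) h h1
theorem pvFindA_false_two (lines : List String) (k : Nat) {r1 r2 : List String}
    (h : pvDropToMarker lines = some r1) (h1 : pvDropToMarker r1 = some r2) :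
    pvFindBodyA lines (k : Int) false = ((k + (lines.length - r2.length) : Nat) : Int) := by
  induction lines generalizing k r1 with
  | nil => simp [pvDropToMarker] at h
  | cons l rest ih =>
    by_cases hm : (l == "---") = true
    · rw [show pvDropToMarker (l :: rest) = some rest from by simp [pvDropToMarker, hm]] at h
      obtain rfl : rest = r1 := Option.some.inj h
      have hstep : pvFindBodyA (l :: rest) (k : Int) false = pvFindBodyA rest ((k : Int) + 1) true := by
        simp [pvFindBodyA, hm]
      have hlt := pvDrop_length h1
      rw [hstep, show (k : Int) + 1 = ((k + 1 : Nat) : Int) from by push_cast; ring,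
        pvFindA_true_some rest (k + 1) h1]
      simp only [List.length_cons]
      norm_cast
      omega
    · have hm' : (l == "---") = false := by simpa using hm
      rw [show pvDropToMarker (l :: rest) = pvDropToMarker rest from by
        simp [pvDropToMarker, hm']] at h
      have hstep : pvFindBodyA (l :: rest) (k : Int) false = pvFindBodyA rest ((k : Int) + 1) false := by
        simp [pvFindBodyA, hm']
      have hlt := Nat.lt_of_lt_of_le (pvDrop_length h1) (Nat.le_of_lt (pvDrop_length h))
      rw [hstep, show (k : Int) + 1 = ((k + 1 : Nat) : Int) from by push_cast; ring, ih (k + 1) h h1]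
      simp only [List.length_cons]
      norm_cast
      omega
theorem pvStrip_empty (cs : List Char) :
    (PySem.Chars.strip cs = []) ↔ ∀ c ∈ cs, PySem.Chars.isspace c = true := by
  simp only [PySem.Chars.strip, PySem.Chars.lstrip, PySem.Chars.rstrip,
    List.reverse_eq_nil_iff, List.dropWhile_eq_nil_iff, List.mem_reverse]
  constructor
  · intro h c hc
    rw [← List.takeWhile_append_dropWhile (p := PySem.Chars.isspace) (l := cs)] at hc
    rcases List.mem_append.mp hc with h1 | h2
    · exact List.mem_takeWhile_imp h1
    · exact h c h2
  · intro h c hc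
    exact h c (List.Sublist.mem hc (List.dropWhile_sublist _))

theorem pvStripStr_empty (s : String) :
    ((PySem.Str.strip s == "") = true) ↔ ∀ c ∈ s.toList, PySem.Chars.isspace c = true := by
  rw [beq_iff_eq, ← String.toList_eq_nil_iff, PySem.Str.toList_strip, pvStrip_empty]

theorem pvJoinChars (ps : List (List Char)) :
    (∀ c ∈ PySem.Chars.join ['\n'] ps, PySem.Chars.isspace c = true) ↔
      ∀ l ∈ ps, ∀ c ∈ l, PySem.Chars.isspace c = true := by
  induction ps with
  | nil => simp [PySem.Chars.join, List.intercalate]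
  | cons p rest ih =>
    cases rest with
    | nil => simp [PySem.Chars.join_singleton]
    | cons q rest' =>
      rw [PySem.Chars.join_cons_cons]
      constructor
      · refine fun h l hl => ?_
        rcases List.mem_cons.mp hl with rfl | hl
        · exact fun c hc => h c (by simp [hc])
        · exact ih.mp (fun c hc => h c (by simp [hc])) l hl
      · intro h c hc
        simp only [List.append_assoc, List.mem_append, List.mem_singleton] at hc
        rcases hc with hc | hc | hc
        · exact h p (by simp) c hc
        · subst hc; decide
        · exact ih.mpr (fun l hl => h l (by simp [hl])) c hc

theorem pvJoinBlank (parts : List String) :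
    (PySem.Str.len (PySem.Str.strip (PySem.Str.join "\n" parts)) == 0) = pvAllBlank parts := by
  unfold pvAllBlank
  rw [Bool.eq_iff_iff, PySem.Str.len_eq, beq_iff_eq, Nat.cast_eq_zero, List.length_eq_zero_iff,
    PySem.Str.toList_strip, pvStrip_empty, PySem.Str.toList_join,
    show ("\n" : String).toList = ['\n'] from rfl, pvJoinChars, List.all_eq_true]
  constructor
  · intro h l hl
    exact (pvStripStr_empty l).mpr (h l.toList (List.mem_map_of_mem hl))
  · intro h l hl
    rcases List.mem_map.mp hl with ⟨x, hx, rfl⟩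
    exact (pvStripStr_empty x).mp (h x hx)

-- fold characterization, staged by the running marker count
theorem pvFold_ge2 (lines : List String) (m : Int) (ab tb : Bool) (hm : 2 ≤ m) :
    lines.foldl pvStepB (m, ab, tb) =
      ((lines.foldl pvStepB (m, ab, tb)).1, ab && pvAllBlank lines, tb && pvAllBlank lines) := by
  induction lines generalizing m ab tb with
  | nil => simp [pvAllBlank]
  | cons l rest ih =>
    have hstep : pvStepB (m, ab, tb) l =
        (if l == "---" then m + 1 else m, ab && (PySem.Str.strip l == ""),
          tb && (PySem.Str.strip l == "")) := by
      simp [pvStepB, if_pos hm]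
    have hm' : 2 ≤ (if l == "---" then m + 1 else m) := by split_ifs <;> omega
    simp only [List.foldl_cons, hstep]
    rw [ih _ _ _ hm', ih _ _ _ hm']
    simp [pvAllBlank, Bool.and_assoc]

theorem pvFold_one (lines : List String) (ab tb : Bool) {r : List String}
    (hdr : pvDropToMarker lines = some r) :
    lines.foldl pvStepB (1, ab, tb) =
      ((lines.foldl pvStepB (1, ab, tb)).1, ab && pvAllBlank lines, tb && pvAllBlank r) := by
  induction lines generalizing ab tb with
  | nil => simp [pvDropToMarker] at hdr
  | cons l rest ih =>
    by_cases hm : (l == "---") = true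
    · rw [show pvDropToMarker (l :: rest) = some rest from by simp [pvDropToMarker, hm]] at hdr
      obtain hrfl := Option.some.inj hdr
      subst hrfl
      have hstep : pvStepB (1, ab, tb) l = (2, ab && (PySem.Str.strip l == ""), tb) := by
        simp [pvStepB, hm]
      simp only [List.foldl_cons, hstep]
      rw [pvFold_ge2 rest 2 _ _ (by norm_num), pvFold_ge2 rest 2 _ _ (by norm_num)]
      simp [pvAllBlank, Bool.and_assoc]
    · have hm' : (l == "---") = false := by simpa using hm
      rw [show pvDropToMarker (l :: rest) = pvDropToMarker rest from by
        simp [pvDropToMarker, hm']] at hdr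
      have hstep : pvStepB (1, ab, tb) l = (1, ab && (PySem.Str.strip l == ""), tb) := by
        simp [pvStepB, hm']
      simp only [List.foldl_cons, hstep]
      rw [ih _ _ hdr, ih _ _ hdr]
      simp [pvAllBlank, Bool.and_assoc]

theorem pvFold_one_none (lines : List String) (ab tb : Bool)
    (hdr : pvDropToMarker lines = none) :
    lines.foldl pvStepB (1, ab, tb) =
      ((lines.foldl pvStepB (1, ab, tb)).1, ab && pvAllBlank lines, tb) := by
  induction lines generalizing ab tb with
  | nil => simp [pvAllBlank]
  | cons l rest ih =>
    by_cases hm : (l == "---") = true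
    · rw [show pvDropToMarker (l :: rest) = some rest from by simp [pvDropToMarker, hm]] at hdr
      exact absurd hdr (by simp)
    · have hm' : (l == "---") = false := by simpa using hm
      rw [show pvDropToMarker (l :: rest) = pvDropToMarker rest from by
        simp [pvDropToMarker, hm']] at hdr
      have hstep : pvStepB (1, ab, tb) l = (1, ab && (PySem.Str.strip l == ""), tb) := by
        simp [pvStepB, hm']
      simp only [List.foldl_cons, hstep]
      rw [ih _ _ hdr, ih _ _ hdr]
      simp [pvAllBlank, Bool.and_assoc]

theorem pvFold_zero_none (lines : List String) (ab tb : Bool)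
    (hdr : pvDropToMarker lines = none) :
    lines.foldl pvStepB (0, ab, tb) =
      ((lines.foldl pvStepB (0, ab, tb)).1, ab && pvAllBlank lines, tb) := by
  induction lines generalizing ab tb with
  | nil => simp [pvAllBlank]
  | cons l rest ih =>
    by_cases hm : (l == "---") = true
    · rw [show pvDropToMarker (l :: rest) = some rest from by simp [pvDropToMarker, hm]] at hdr
      exact absurd hdr (by simp)
    · have hm' : (l == "---") = false := by simpa using hm
      rw [show pvDropToMarker (l :: rest) = pvDropToMarker rest from by
        simp [pvDropToMarker, hm']] at hdr
      have hstep : pvStepB (0, ab, tb) l = (0, ab && (PySem.Str.strip l == ""), tb) := by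
        simp [pvStepB, hm']
      simp only [List.foldl_cons, hstep]
      rw [ih _ _ hdr, ih _ _ hdr]
      simp [pvAllBlank, Bool.and_assoc]

theorem pvFold_zero_one (lines : List String) (ab tb : Bool) {r1 : List String}
    (hdr : pvDropToMarker lines = some r1) (hdr1 : pvDropToMarker r1 = none) :
    lines.foldl pvStepB (0, ab, tb) =
      ((lines.foldl pvStepB (0, ab, tb)).1, ab && pvAllBlank lines, tb) := by
  induction lines generalizing ab tb with
  | nil => simp [pvDropToMarker] at hdr
  | cons l rest ih =>
    by_cases hm : (l == "---") = true
    · rw [show pvDropToMarker (l :: rest) = some rest from by simp [pvDropToMarker, hm]] at hdr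
      obtain hrfl := Option.some.inj hdr
      subst hrfl
      have hstep : pvStepB (0, ab, tb) l = (1, ab && (PySem.Str.strip l == ""), tb) := by
        simp [pvStepB, hm]
      simp only [List.foldl_cons, hstep]
      rw [pvFold_one_none rest _ _ hdr1, pvFold_one_none rest _ _ hdr1]
      simp [pvAllBlank, Bool.and_assoc]
    · have hm' : (l == "---") = false := by simpa using hm
      rw [show pvDropToMarker (l :: rest) = pvDropToMarker rest from by
        simp [pvDropToMarker, hm']] at hdr
      have hstep : pvStepB (0, ab, tb) l = (0, ab && (PySem.Str.strip l == ""), tb) := by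
        simp [pvStepB, hm']
      simp only [List.foldl_cons, hstep]
      rw [ih _ _ hdr, ih _ _ hdr]
      simp [pvAllBlank, Bool.and_assoc]

theorem pvFold_zero_two (lines : List String) (ab tb : Bool) {r1 r2 : List String}
    (hdr : pvDropToMarker lines = some r1) (hdr1 : pvDropToMarker r1 = some r2) :
    lines.foldl pvStepB (0, ab, tb) =
      ((lines.foldl pvStepB (0, ab, tb)).1, ab && pvAllBlank lines, tb && pvAllBlank r2) := by
  induction lines generalizing ab tb with
  | nil => simp [pvDropToMarker] at hdr
  | cons l rest ih =>
    by_cases hm : (l == "---") = true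
    · rw [show pvDropToMarker (l :: rest) = some rest from by simp [pvDropToMarker, hm]] at hdr
      obtain hrfl := Option.some.inj hdr
      subst hrfl
      have hstep : pvStepB (0, ab, tb) l = (1, ab && (PySem.Str.strip l == ""), tb) := by
        simp [pvStepB, hm]
      simp only [List.foldl_cons, hstep]
      rw [pvFold_one rest _ _ hdr1, pvFold_one rest _ _ hdr1]
      simp [pvAllBlank, Bool.and_assoc]
    · have hm' : (l == "---") = false := by simpa using hm
      rw [show pvDropToMarker (l :: rest) = pvDropToMarker rest from by
        simp [pvDropToMarker, hm']] at hdr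
      have hstep : pvStepB (0, ab, tb) l = (0, ab && (PySem.Str.strip l == ""), tb) := by
        simp [pvStepB, hm']
      simp only [List.foldl_cons, hstep]
      rw [ih _ _ hdr, ih _ _ hdr]
      simp [pvAllBlank, Bool.and_assoc]

theorem pvFold_count (lines : List String) (m : Int) (ab tb : Bool) :
    (lines.foldl pvStepB (m, ab, tb)).1 = m + pvCount lines := by
  induction lines generalizing m ab tb with
  | nil => simp [pvCount]
  | cons l rest ih =>
    simp only [List.foldl_cons, pvStepB, ih, pvCount, List.countP_cons]
    split_ifs with hm
    · simp
      ring
    · simp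

theorem pvCount_drop_none {lines : List String} (h : pvDropToMarker lines = none) :
    pvCount lines = 0 := by
  induction lines with
  | nil => rfl
  | cons l rest ih =>
    by_cases hm : (l == "---") = true
    · rw [show pvDropToMarker (l :: rest) = some rest from by simp [pvDropToMarker, hm]] at h
      exact absurd h (by simp)
    · have hm' : (l == "---") = false := by simpa using hm
      rw [show pvDropToMarker (l :: rest) = pvDropToMarker rest from by
        simp [pvDropToMarker, hm']] at h
      rw [show pvCount (l :: rest) = pvCount rest from by simp [pvCount, hm']]
      exact ih h
theorem pvCount_drop_some {lines r : List String} (h : pvDropToMarker lines = some r) :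
    pvCount lines = 1 + pvCount r := by
  induction lines generalizing r with
  | nil => simp [pvDropToMarker] at h
  | cons l rest ih =>
    by_cases hm : (l == "---") = true
    · rw [show pvDropToMarker (l :: rest) = some rest from by simp [pvDropToMarker, hm]] at h
      obtain rfl : rest = r := Option.some.inj h
      simp only [pvCount, List.countP_cons, hm, if_pos]
      push_cast
      ring
    · have hm' : (l == "---") = false := by simpa using hm
      rw [show pvDropToMarker (l :: rest) = pvDropToMarker rest from by
        simp [pvDropToMarker, hm']] at h
      rw [show pvCount (l :: rest) = pvCount rest from by simp [pvCount, hm']]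
      exact ih h
theorem pvCount_nonneg (lines : List String) : 0 ≤ pvCount lines := by
  simp [pvCount]

-- ===== VERDICT (by name: the statement is the Claim_ definition above) =====
set_option maxHeartbeats 1000000 in
theorem is_stub_page_spec : Claim_equal_is_stub_page := by
  intro content _
  unfold Spec_is_stub_page is_stub_page is_stub_page_alt
  by_cases hdesc : PySem.Str.isIn "description: \"\"" content
  · rw [if_pos hdesc, if_pos hdesc]
  · rw [if_neg hdesc, if_neg hdesc]
    set lines := (PySem.Str.split? (PySem.Str.strip content) "\n").getD [] with hlines
    clear_value lines
    show (PySem.Str.len (PySem.Str.strip (PySem.Str.join "\n"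
        (PySem.List.slice lines (some (pvFindBodyA lines 0 false)) none))) == 0) =
      (if 2 ≤ (lines.foldl pvStepB (0, true, true)).1
        then (lines.foldl pvStepB (0, true, true)).2.2
        else (lines.foldl pvStepB (0, true, true)).2.1)
    cases hr : pvDropToMarker lines with
    | none =>
      have hc := pvCount_drop_none hr
      rw [pvFold_zero_none lines true true hr, pvFold_count lines 0 true true,
        pvFindA_none lines 0 false hr,
        PySem.List.slice_from lines (by norm_num : (0:Int) ≤ 0)]
      simp only [Int.toNat_zero, List.drop_zero, pvJoinBlank]
      rw [if_neg (by omega)]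
      simp
    | some r1 =>
      have hc1 := pvCount_drop_some hr
      cases hr1 : pvDropToMarker r1 with
      | none =>
        have hc2 := pvCount_drop_none hr1
        rw [pvFold_zero_one lines true true hr hr1, pvFold_count lines 0 true true,
          pvFindA_false_one lines 0 hr hr1,
          PySem.List.slice_from lines (by norm_num : (0:Int) ≤ 0)]
        simp only [Int.toNat_zero, List.drop_zero, pvJoinBlank]
        rw [if_neg (by omega)]
        simp
      | some r2 =>
        have hc2 := pvCount_drop_some hr1
        have hnn := pvCount_nonneg r2
        have hfind : pvFindBodyA lines 0 false = ((lines.length - r2.length : Nat) : Int) := by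
          have h := pvFindA_false_two lines 0 hr hr1
          rw [Nat.cast_zero, Nat.zero_add] at h
          exact h
        rw [pvFold_zero_two lines true true hr hr1, pvFold_count lines 0 true true, hfind,
          PySem.List.slice_from lines (Int.natCast_nonneg _)]
        simp only [Int.toNat_natCast]
        have hdd : lines.drop (lines.length - r2.length) = r2 := by
          have e1 := pvDrop_drop hr
          have e2 := pvDrop_drop hr1
          have hl1 := pvDrop_length hr
          have hl2 := pvDrop_length hr1
          rw [← e1, List.drop_drop] at e2
          rw [e1] at e2
          rw [show lines.length - r1.length + (r1.length - r2.length) = lines.length - r2.length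
            from by omega] at e2
          exact e2
        rw [hdd, pvJoinBlank, if_pos (by omega)]
        simp
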